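-- pv_equiv track=rewrite | github.com/codydjango/algorithms | greedyoldersister.py | greedyoldersister
-- ===== SOURCE A (Python) =====
-- def greedyoldersister(arr=[]):
--     numeach = len(arr) // 2
--     setarr = set(arr)
--     sister = []
--     brother = []
--
--
--     for x in setarr:
--         sister.append(arr.pop(arr.index(x)))
--
--     # give the rest to brother
--     brother = arr
--
--     # equalize out
--     if len(brother) > len(sister):
--         cut = numeach - len(sister)
--         sister.extend(brother[:cut])
--         brother = brother[cut:]
--
--     elif len(sister) > len(brother):
--         cut = numeach - len(brother)
--         brother.extend(sister[:cut])
--         sister = sister[cut:]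
--
--     return len(list(set(sister)))
-- ===== SOURCE B (Python) =====
-- def greedyoldersister(arr=[]):
--     # Closed-form: sister gets one of each distinct value, then halves are equalized.
--     # If distinct count d fits in half, the answer is d; otherwise sister keeps n - n//2 distinct items.
--     n = len(arr)
--     d = len(set(arr))
--     return d if 2 * d <= n else n - n // 2
-- ===== Notes on version B (the rewrite author's own statement) =====
-- stated objective: faster
-- what changed: Replaces the simulation (repeated arr.index/arr.pop over the set, then list surgery to equalize the halves) with a closed form on n=len(arr) and d=len(set(arr)): d if 2*d<=n else n-n//2; note A mutates its argument in place while B does not (return value equivalence only).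
import Mathlib
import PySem

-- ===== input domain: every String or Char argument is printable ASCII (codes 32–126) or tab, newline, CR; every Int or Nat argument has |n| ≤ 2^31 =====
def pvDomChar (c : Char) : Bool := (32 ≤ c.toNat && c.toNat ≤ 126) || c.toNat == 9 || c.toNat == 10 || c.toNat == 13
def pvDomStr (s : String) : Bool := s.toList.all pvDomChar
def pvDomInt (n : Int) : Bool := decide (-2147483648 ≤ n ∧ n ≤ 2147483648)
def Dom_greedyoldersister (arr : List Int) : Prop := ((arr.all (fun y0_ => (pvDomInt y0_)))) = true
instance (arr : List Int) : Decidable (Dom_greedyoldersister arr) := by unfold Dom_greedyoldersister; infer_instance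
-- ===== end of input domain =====

-- ===== PORT A =====
-- B replaces A's quadratic simulation with its closed form (faster); Python A mutates its
-- argument in place (arr.pop) — the equivalence proved here is about the RETURN value only.
-- A iterates over set(arr); its result is independent of that iteration order, so the
-- port iterates the set in first-occurrence order.

-- one iteration of A's 'for x in setarr: sister.append(arr.pop(arr.index(x)))'
def aStep (st : List Int × List Int) (x : Int) : List Int × List Int :=
  match PySem.List.index? st.1 x with
  | none => st
  | some i =>
    match PySem.List.pop? st.1 (i : Int) with
    | none => st
    | some (v, rest) => (rest, st.2 ++ [v])

def greedyoldersister (arr : List Int) : Int :=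
  let numeach : Int := PySem.Int.floordiv (arr.length : Int) 2
  let setarr : PySem.Set Int := PySem.Set.ofList arr
  let st := setarr.foldl aStep (arr, [])
  let brother := st.1
  let sister := st.2
  if brother.length > sister.length then
    let cut : Int := numeach - (sister.length : Int)
    let sister' := sister ++ PySem.List.slice brother none (some cut)
    ((PySem.Set.ofList sister').length : Int)
  else if sister.length > brother.length then
    let cut : Int := numeach - (brother.length : Int)
    let sister' := PySem.List.slice sister (some cut) none
    ((PySem.Set.ofList sister').length : Int)
  else
    ((PySem.Set.ofList sister).length : Int)

-- ===== PORT B =====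
def greedyoldersister_alt (arr : List Int) : Int :=
  let n : Int := (arr.length : Int)
  let d : Int := ((PySem.Set.ofList arr).length : Int)
  if 2 * d ≤ n then d else n - PySem.Int.floordiv n 2

-- ===== PRECONDITION & SPEC =====
def Spec_greedyoldersister (arr : List Int) (out : Int) : Prop := out = greedyoldersister_alt arr
instance (arr : List Int) (out : Int) : Decidable (Spec_greedyoldersister arr out) := by unfold Spec_greedyoldersister; infer_instance

-- ===== CLAIM (what is proved, stated in full; the proofs are below) =====
def Claim_equal_greedyoldersister : Prop := ∀ (arr : List Int), Dom_greedyoldersister arr → Spec_greedyoldersister arr (greedyoldersister arr)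

-- ===== LEMMAS AND PROOFS =====
theorem aStep_of_mem (l sis : List Int) (x : Int) (hx : x ∈ l) :
    aStep (l, sis) x = (l.erase x, sis ++ [x]) := by
  obtain ⟨k, hk⟩ := Option.isSome_iff_exists.mp ((PySem.List.index?_isSome_iff l x).mpr hx)
  obtain ⟨hlt, hget, _⟩ := PySem.List.getElem_of_index?_eq_some hk
  have hidx : l.idxOf x = k := by
    rw [List.idxOf_eq_getD_idxOf?, ← PySem.List.index?_eq_idxOf?, hk]; rfl
  have hpop : PySem.List.pop? l (k : Int) = some (l[k], l.eraseIdx k) :=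
    PySem.List.pop?_natCast l k hlt
  simp only [aStep, hk, hpop, hget]
  rw [List.erase_eq_eraseIdx_of_idxOf hidx]

theorem foldl_aStep (s : List Int) (l sis : List Int) (hnd : s.Nodup)
    (hmem : ∀ y ∈ s, y ∈ l) :
    s.foldl aStep (l, sis) = (s.foldl (·.erase ·) l, sis ++ s) := by
  induction s generalizing l sis with
  | nil => simp
  | cons x t ih =>
    simp only [List.foldl_cons]
    rw [aStep_of_mem l sis x (hmem x (by simp))]
    rw [ih (l.erase x) (sis ++ [x]) hnd.of_cons
      (fun y hy => (List.mem_erase_of_ne (by rintro rfl; exact (List.nodup_cons.mp hnd).1 hy)).mpr (hmem y (by simp [hy])))]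
    simp

theorem length_foldl_erase (s l : List Int) (hnd : s.Nodup) (hmem : ∀ y ∈ s, y ∈ l) :
    (s.foldl (·.erase ·) l).length = l.length - s.length := by
  induction s generalizing l with
  | nil => simp
  | cons x t ih =>
    simp only [List.foldl_cons, List.length_cons]
    rw [ih (l.erase x) hnd.of_cons
      (fun y hy => (List.mem_erase_of_ne (by rintro rfl; exact (List.nodup_cons.mp hnd).1 hy)).mpr (hmem y (by simp [hy])))]
    rw [List.length_erase_of_mem (hmem x (by simp))]
    omega

theorem mem_foldl_erase (s l : List Int) (y : Int) (hy : y ∈ s.foldl (·.erase ·) l) : y ∈ l := by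
  induction s generalizing l with
  | nil => simpa using hy
  | cons x t ih =>
    simp only [List.foldl_cons] at hy
    exact List.erase_subset (ih (l.erase x) hy)

theorem ofList_append_subset (l t : List Int) (hnd : l.Nodup) (ht : ∀ y ∈ t, y ∈ l) :
    PySem.Set.ofList (l ++ t) = l := by
  rw [PySem.Set.ofList_eq_foldl, List.foldl_append, ← PySem.Set.ofList_eq_foldl,
    PySem.Set.ofList_eq_self_of_nodup l hnd]
  induction t with
  | nil => simp
  | cons x u ih =>
    simp only [List.foldl_cons]
    have : PySem.Set.add l x = l := by
      simp [PySem.Set.add, PySem.Set.contains, ht x (by simp)]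
    rw [this]
    exact ih (fun y hy => ht y (by simp [hy]))

-- ===== VERDICT (by name: the statement is the Claim_ definition above) =====
theorem greedyoldersister_spec : Claim_equal_greedyoldersister := by
  intro arr _
  show greedyoldersister arr = greedyoldersister_alt arr
  unfold greedyoldersister greedyoldersister_alt
  set D := PySem.Set.ofList arr with hD
  have hnd : D.Nodup := PySem.Set.nodup_ofList arr
  have hmemD : ∀ y ∈ D, y ∈ arr := fun y hy => (PySem.Set.mem_ofList arr y).mp hy
  set R := D.foldl (·.erase ·) arr with hR
  have hfold : D.foldl aStep (arr, []) = (R, D) := by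
    rw [foldl_aStep D arr [] hnd hmemD, List.nil_append]
  set n := arr.length with hn
  set d := D.length with hd
  have hdn : d ≤ n := (List.subperm_of_subset hnd hmemD).length_le
  have hRlen : R.length = n - d := length_foldl_erase D arr hnd hmemD
  have hfd : PySem.Int.floordiv (n : Int) 2 = ((n / 2 : Nat) : Int) := by
    exact_mod_cast PySem.Int.floordiv_natCast n 2
  simp only [hfold, hfd, hRlen]
  by_cases h1 : n - d > d
  · -- brother longer
    rw [if_pos h1]
    have hcut : (0:Int) ≤ ((n / 2 : Nat) : Int) - (d : Int) := by
      have : d ≤ n / 2 := by omega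
      omega
    rw [PySem.List.slice_to _ hcut]
    have : PySem.Set.ofList (D ++ (R.take ((((n / 2 : Nat) : Int) - (d : Int)).toNat))) = D := by
      apply ofList_append_subset D _ hnd
      intro y hy
      exact (PySem.Set.mem_ofList arr y).mpr (mem_foldl_erase D arr y (List.mem_of_mem_take hy))
    rw [this]
    rw [if_pos (by omega : 2 * (d : Int) ≤ (n : Int))]
  · rw [if_neg h1]
    by_cases h2 : d > n - d
    · rw [if_pos h2]
      have hcut : (0:Int) ≤ ((n / 2 : Nat) : Int) - ((n - d : Nat) : Int) := by
        have : n - d ≤ n / 2 := by omega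
        omega
      rw [PySem.List.slice_from _ hcut]
      have hc : ((((n / 2 : Nat) : Int) - ((n - d : Nat) : Int)).toNat) = n / 2 - (n - d) := by omega
      rw [hc]
      have hnodrop : (D.drop (n / 2 - (n - d))).Nodup := hnd.sublist (List.drop_sublist _ _)
      rw [PySem.Set.ofList_eq_self_of_nodup _ hnodrop]
      rw [List.length_drop, ← hd]
      rw [if_neg (by omega : ¬ 2 * (d : Int) ≤ (n : Int))]
      omega
    · rw [if_neg h2]
      rw [PySem.Set.ofList_eq_self_of_nodup D hnd, ← hd]
      rw [if_pos (by omega : 2 * (d : Int) ≤ (n : Int))]
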